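-- pv_equiv track=rewrite | github.com/Frencil/eclipsetracks | scraper/scraper.py | preparseHyphens
-- ===== SOURCE A (Python) =====
-- def preparseHyphens(row):
--     try:
--         while (row.index('-') > 0) and (row.index('-') < 6):
--             index = row.index('-')
--             row[index] = '?'
--             row.insert(index+1, '?')
--         return row
--     except ValueError:
--         return row
-- ===== SOURCE B (Python) =====
-- def preparseHyphens(row):
--     result = []
--     conversions = 0
--     stopped = False
--     for i, x in enumerate(row):
--         if x == '-' and not stopped:
--             if 0 < i + conversions < 6:
--                 result.append('?')
--                 result.append('?')
--                 conversions += 1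
--             else:
--                 result.append(x)
--                 stopped = True
--         else:
--             result.append(x)
--     row[:] = result
--     return row
-- ===== Notes on version B (the rewrite author's own statement) =====
-- stated objective: simpler
-- what changed: A repeatedly rescans the list with row.index('-') and mutates it mid-scan; B makes one forward pass over enumerate(row), tracking how many hyphens were already doubled (virtual position) and a stop flag, then writes the result back in one slice assignment.
import Mathlib
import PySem

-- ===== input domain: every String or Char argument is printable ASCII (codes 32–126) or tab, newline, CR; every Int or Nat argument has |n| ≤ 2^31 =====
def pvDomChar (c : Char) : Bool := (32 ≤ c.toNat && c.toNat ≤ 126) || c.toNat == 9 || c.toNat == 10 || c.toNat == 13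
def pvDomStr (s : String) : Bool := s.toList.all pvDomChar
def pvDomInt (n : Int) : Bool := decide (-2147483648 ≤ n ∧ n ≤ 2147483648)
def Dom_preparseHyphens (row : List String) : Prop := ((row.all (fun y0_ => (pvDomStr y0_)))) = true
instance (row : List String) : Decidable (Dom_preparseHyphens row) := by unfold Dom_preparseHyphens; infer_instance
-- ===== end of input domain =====

-- B replaces A's repeated row.index('-') rescans with a single forward pass (simpler, one pass);
-- both Pythons mutate row in place identically, the theorems are about the return value.

-- ===== PORT A =====
-- while row.index('-') in (0,6): double it; ValueError (no '-') returns row.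
-- fuel = number of '-' in row: each loop iteration removes one '-', so this bound is exact.
def pvLoopA : Nat → List String → List String
  | 0, row => row
  | fuel+1, row =>
    match PySem.List.index? row "-" with
    | none => row                                  -- ValueError: return row
    | some idx =>
      if 0 < idx ∧ idx < 6 then
        pvLoopA fuel (PySem.List.insert (row.set idx "?") ((idx : Int) + 1) "?")
      else row

def preparseHyphens (row : List String) : List String := pvLoopA (row.count "-") row

-- ===== PORT B =====
def pvStepB (st : List String × Int × Bool) (p : Int × String) : List String × Int × Bool :=
  match st, p with
  | (result, conversions, stopped), (i, x) =>
    if x = "-" ∧ stopped = false then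
      if 0 < i + conversions ∧ i + conversions < 6 then
        (result ++ ["?", "?"], conversions + 1, stopped)
      else
        (result ++ [x], conversions, true)
    else
      (result ++ [x], conversions, stopped)

def preparseHyphens_alt (row : List String) : List String :=
  ((PySem.List.enumerate row).foldl pvStepB ([], 0, false)).1

-- ===== PRECONDITION & SPEC =====
def Spec_preparseHyphens (row : List String) (out : List String) : Prop := out = preparseHyphens_alt row
instance (row : List String) (out : List String) : Decidable (Spec_preparseHyphens row out) := by unfold Spec_preparseHyphens; infer_instance

-- ===== CLAIM (what is proved, stated in full; the proofs are below) =====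
def Claim_equal_preparseHyphens : Prop := ∀ (row : List String), Dom_preparseHyphens row → Spec_preparseHyphens row (preparseHyphens row)

-- ===== LEMMAS AND PROOFS =====

-- Common abstraction: scan from the left, k = current index in the (mutated) list.
def pvGo : List String → Nat → List String
  | [], _ => []
  | x :: s, k =>
    if x = "-" then
      if 0 < k ∧ k < 6 then "?" :: "?" :: pvGo s (k+2) else x :: s
    else x :: pvGo s (k+1)

theorem pvGo_no_hyphen (s : List String) (k : Nat) (h : "-" ∉ s) : pvGo s k = s := by
  induction s generalizing k with
  | nil => rfl
  | cons x s ih =>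
    have hx : x ≠ "-" := fun hx => h (by simp [hx])
    simp [pvGo, hx, ih (k+1) (fun hm => h (List.mem_cons_of_mem _ hm))]

theorem pvGo_append (s₁ t : List String) (k : Nat) (h : "-" ∉ s₁) :
    pvGo (s₁ ++ t) k = s₁ ++ pvGo t (k + s₁.length) := by
  induction s₁ generalizing k with
  | nil => simp
  | cons x s ih =>
    have hx : x ≠ "-" := fun hx => h (by simp [hx])
    have h' : "-" ∉ s := fun hm => h (List.mem_cons_of_mem _ hm)
    have harith : k + 1 + s.length = k + (s.length + 1) := by omega
    simp [pvGo, hx, ih (k+1) h', harith]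

theorem pvIndex_append (p s : List String) (v : String) (h : v ∉ p) :
    PySem.List.index? (p ++ s) v = (PySem.List.index? s v).map (· + p.length) := by
  induction p with
  | nil => simp
  | cons x p ih =>
    have hx : x ≠ v := fun hx => h (by simp [hx])
    have h' : v ∉ p := fun hm => h (List.mem_cons_of_mem _ hm)
    rw [List.cons_append, PySem.List.index?_cons_of_ne (p ++ s) hx, ih h']
    cases PySem.List.index? s v with
    | none => rfl
    | some j => simp; omega

theorem pvSet_mid {α : Type} (a : List α) (b : α) (c : List α) (v : α) :
    (a ++ b :: c).set a.length v = a ++ v :: c := by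
  induction a with
  | nil => rfl
  | cons x a ih => simp [ih]

theorem pvInsert_mid (a c : List String) (v w : String) :
    PySem.List.insert (a ++ v :: c) ((a.length : Int) + 1) w = a ++ v :: w :: c := by
  have hle : a.length + 1 ≤ (a ++ v :: c).length := by simp
  have hcast : ((a.length : Int) + 1) = ((a.length + 1 : Nat) : Int) := by push_cast; ring
  rw [hcast, PySem.List.insert_natCast _ _ _ hle]
  have ht : ∀ (a : List String), (a ++ v :: c).take (a.length + 1) = a ++ [v] := by
    intro a
    induction a with
    | nil => rfl
    | cons x a ih => simp [List.take_succ_cons, ih]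
  have hd : ∀ (a : List String), (a ++ v :: c).drop (a.length + 1) = c := by
    intro a
    induction a with
    | nil => rfl
    | cons x a ih => simp [List.drop_succ_cons, ih]
  rw [ht a, hd a]
  simp

theorem pvFold_stopped (s : List String) (i : Int) (res : List String) (c : Int) :
    (PySem.List.enumerate s i).foldl pvStepB (res, c, true) = (res ++ s, c, true) := by
  induction s generalizing i res with
  | nil => simp [PySem.List.enumerate_nil]
  | cons x s ih =>
    rw [PySem.List.enumerate_cons, List.foldl_cons]
    have hstep : pvStepB (res, c, true) (i, x) = (res ++ [x], c, true) := by
      simp [pvStepB]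
    rw [hstep, ih]
    simp

theorem pvFold_go (s : List String) (res : List String) (i c : Int) (hi : 0 ≤ i) (hc : 0 ≤ c) :
    ((PySem.List.enumerate s i).foldl pvStepB (res, c, false)).1
      = res ++ pvGo s (i + c).toNat := by
  induction s generalizing res i c with
  | nil => simp [PySem.List.enumerate_nil, pvGo]
  | cons x s ih =>
    rw [PySem.List.enumerate_cons, List.foldl_cons]
    by_cases hx : x = "-"
    · subst hx
      by_cases hcond : 0 < i + c ∧ i + c < 6
      · have hstep : pvStepB (res, c, false) (i, "-") = (res ++ ["?", "?"], c + 1, false) := by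
          have hcT : (0 < i + c ∧ i + c < 6) = True := eq_true hcond
          simp [pvStepB, hcT]
        rw [hstep, ih (res ++ ["?", "?"]) (i+1) (c+1) (by omega) (by omega)]
        have hk : 0 < (i + c).toNat ∧ (i + c).toNat < 6 := by omega
        have harith : (i + 1 + (c + 1)).toNat = (i + c).toNat + 2 := by omega
        simp [pvGo, harith]
        omega
      · have hstep : pvStepB (res, c, false) (i, "-") = (res ++ ["-"], c, true) := by
          have hcF : (0 < i + c ∧ i + c < 6) = False := eq_false hcond
          simp [pvStepB, hcF]
        rw [hstep, pvFold_stopped]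
        have hk : ¬ (0 < (i + c).toNat ∧ (i + c).toNat < 6) := by omega
        simp [pvGo]
        omega
    · have hstep : pvStepB (res, c, false) (i, x) = (res ++ [x], c, false) := by
        simp only [pvStepB]
        rw [if_neg (fun h => hx h.1)]
      rw [hstep, ih (res ++ [x]) (i+1) c (by omega) hc]
      have harith : (i + 1 + c).toNat = (i + c).toNat + 1 := by omega
      simp [pvGo, hx, harith]

theorem pvLoopA_go (fuel : Nat) (p s : List String) (hp : "-" ∉ p)
    (hcnt : s.count "-" ≤ fuel) :
    pvLoopA fuel (p ++ s) = p ++ pvGo s p.length := by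
  induction fuel generalizing p s with
  | zero =>
    have hs : "-" ∉ s := by
      have := Nat.le_zero.mp hcnt
      exact (List.count_eq_zero.mp this)
    rw [pvLoopA, pvGo_no_hyphen s _ hs]
  | succ fuel ih =>
    rw [pvLoopA, pvIndex_append p s "-" hp]
    cases hidx : PySem.List.index? s "-" with
    | none =>
      have hs : "-" ∉ s := (PySem.List.index?_eq_none_iff s "-").mp hidx
      rw [pvGo_no_hyphen s _ hs]
      rfl
    | some j =>
      obtain ⟨s₁, s₂, hseq, hlen, hs₁⟩ := (PySem.List.index?_eq_some_iff s "-" j).mp hidx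
      have hcount : s₂.count "-" ≤ fuel := by
        have h0 : s₁.count "-" = 0 := List.count_eq_zero.mpr hs₁
        have : s.count "-" = s₂.count "-" + 1 := by
          rw [hseq]; simp [List.count_append, h0]
        omega
      simp only [Option.map_some]
      by_cases hc : 0 < j + p.length ∧ j + p.length < 6
      · rw [if_pos hc]
        have hlenps : (p ++ s₁).length = j + p.length := by simp [hlen]; omega
        have hset : (p ++ s).set (j + p.length) "?" = (p ++ s₁) ++ "?" :: s₂ := by
          rw [hseq, ← List.append_assoc, ← hlenps, pvSet_mid]
        have hIdx : ((j + p.length : Nat) : Int) + 1 = ((p ++ s₁).length : Int) + 1 := by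
          rw [hlenps]
        rw [hset, hIdx, pvInsert_mid]
        have hp' : "-" ∉ (p ++ s₁) ++ ["?", "?"] := by
          intro hm
          rcases List.mem_append.mp hm with hm | hm
          · rcases List.mem_append.mp hm with hm | hm
            · exact hp hm
            · exact hs₁ hm
          · simp at hm
        have hshape : (p ++ s₁) ++ "?" :: "?" :: s₂ = ((p ++ s₁) ++ ["?", "?"]) ++ s₂ := by simp
        rw [hshape, ih _ _ hp' hcount]
        rw [hseq, pvGo_append s₁ _ _ hs₁]
        have hck : 0 < p.length + s₁.length ∧ p.length + s₁.length < 6 := by omega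
        have hgo : pvGo ("-" :: s₂) (p.length + s₁.length)
            = "?" :: "?" :: pvGo s₂ (p.length + s₁.length + 2) := by
          simp [pvGo]
          omega
        have hlen3 : (((p ++ s₁) ++ ["?", "?"]).length) = p.length + s₁.length + 2 := by
          simp; omega
        rw [hgo, hlen3]
        simp
      · rw [if_neg hc]
        rw [hseq, pvGo_append s₁ _ _ hs₁]
        have hck : ¬ (0 < p.length + s₁.length ∧ p.length + s₁.length < 6) := by omega
        have hgo : pvGo ("-" :: s₂) (p.length + s₁.length) = "-" :: s₂ := by
          simp [pvGo]
          omega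
        rw [hgo]

-- ===== VERDICT (by name: the statement is the Claim_ definition above) =====
theorem preparseHyphens_spec : Claim_equal_preparseHyphens := by
  intro row _
  unfold Spec_preparseHyphens preparseHyphens preparseHyphens_alt
  have hA := pvLoopA_go (row.count "-") [] row (by simp) (le_refl _)
  simp only [List.nil_append] at hA
  rw [hA, pvFold_go row [] 0 0 (by omega) (by omega)]
  simp
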